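-- pv_equiv track=rewrite | github.com/daugbit/Cursos | Python 3 (Udemy)/ex019_validador_CNPJ/cnpj.py | sequencetwo
-- ===== SOURCE A (Python) =====
-- def sequencetwo(cnpj):
--     """
--     Função que cria a sequência auxiliar que será utilizada para cálculo do segundo dígito
--     param. cnpj: número do CNPJ no formato de lista de dígitos, apens com o primeiro dígito verificador
--     return: segundo lista auxiliar para o cálculo
--     """
--     aux = []
--     num = 6
--     for i in cnpj:
--         if num >= 2:
--             aux.append(str(num))
--         else:
--             num = 9
--             aux.append(str(num))
--         num -= 1
--     return aux
-- ===== SOURCE B (Python) =====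
-- def sequencetwo(cnpj):
--     """Closed form: position j gets weight (4 - j) % 8 + 2 (the cycle 6,5,4,3,2,9,8,7)."""
--     return [str((4 - j) % 8 + 2) for j, _ in enumerate(cnpj)]
-- ===== Notes on version B (the rewrite author's own statement) =====
-- stated objective: simpler
-- what changed: Replaces the stateful decrementing counter with its reset branch by the closed-form per-index weight (4 - j) % 8 + 2 computed in one comprehension over enumerate.
import Mathlib
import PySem

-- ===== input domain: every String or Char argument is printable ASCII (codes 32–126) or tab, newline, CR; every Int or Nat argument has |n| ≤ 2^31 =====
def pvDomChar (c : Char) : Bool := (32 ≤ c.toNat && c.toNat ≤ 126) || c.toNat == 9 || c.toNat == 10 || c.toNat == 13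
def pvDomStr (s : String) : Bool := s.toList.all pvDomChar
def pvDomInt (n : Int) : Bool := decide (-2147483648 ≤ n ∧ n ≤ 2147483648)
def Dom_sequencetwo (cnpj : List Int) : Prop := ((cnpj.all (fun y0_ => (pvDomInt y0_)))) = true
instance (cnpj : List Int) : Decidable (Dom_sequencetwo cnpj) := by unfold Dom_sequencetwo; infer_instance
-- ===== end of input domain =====

-- B replaces A's stateful decrementing counter (with its reset-to-9 branch) by the
-- closed-form per-index weight (4 - j) % 8 + 2, mapped over enumerate. Objective: simpler.

-- ===== PORT A =====
-- for-loop over cnpj with state (aux, num); each element's value is ignored.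
def sequencetwo (cnpj : List Int) : List String :=
  (cnpj.foldl
    (fun (s : List String × Int) _ =>
      if s.2 ≥ 2 then (s.1 ++ [PySem.Int.toStr s.2], s.2 - 1)
      else (s.1 ++ [PySem.Int.toStr 9], (9 : Int) - 1))
    ([], 6)).1

-- ===== PORT B =====
def sequencetwo_alt (cnpj : List Int) : List String :=
  (PySem.List.enumerate cnpj).map (fun p => PySem.Int.toStr (PySem.Int.mod (4 - p.1) 8 + 2))

-- ===== PRECONDITION & SPEC =====
def Spec_sequencetwo (cnpj : List Int) (out : List String) : Prop := out = sequencetwo_alt cnpj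
instance (cnpj : List Int) (out : List String) : Decidable (Spec_sequencetwo cnpj out) := by unfold Spec_sequencetwo; infer_instance

-- ===== CLAIM (what is proved, stated in full; the proofs are below) =====
def Claim_equal_sequencetwo : Prop := ∀ (cnpj : List Int), Dom_sequencetwo cnpj → Spec_sequencetwo cnpj (sequencetwo cnpj)

-- ===== LEMMAS AND PROOFS =====

-- the closed-form weight at index j
def pvW (j : Int) : Int := PySem.Int.mod (4 - j) 8 + 2

-- the counter value A holds on ENTERING the iteration for index j (1 instead of 9 right after the 2)
def pvV (j : Int) : Int := if pvW j = 9 then 1 else pvW j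

lemma pvW_emod (j : Int) : pvW j = (4 - j) % 8 + 2 := by
  simp [pvW]

lemma pvStep (acc : List String) (j : Int) :
    (if pvV j ≥ 2 then (acc ++ [PySem.Int.toStr (pvV j)], pvV j - 1)
     else (acc ++ [PySem.Int.toStr 9], (9 : Int) - 1))
    = (acc ++ [PySem.Int.toStr (pvW j)], pvV (j + 1)) := by
  have hw := pvW_emod j
  have hw1 := pvW_emod (j + 1)
  by_cases h9 : pvW j = 9
  · have hv : pvV j = 1 := by simp [pvV, h9]
    have : pvV (j + 1) = 8 := by
      have : pvW (j + 1) = 8 := by omega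
      simp [pvV, this]
    simp [hv, h9, this]
  · have hv : pvV j = pvW j := by simp [pvV, h9]
    have hge : pvW j ≥ 2 := by omega
    have : pvV (j + 1) = pvW j - 1 := by
      by_cases h2 : pvW j = 2
      · have : pvW (j + 1) = 9 := by omega
        simp [pvV, this]; omega
      · have hne : pvW (j + 1) ≠ 9 := by omega
        have : pvW (j + 1) = pvW j - 1 := by omega
        simp [pvV, this]; omega
    simp [hv, hge, this]

lemma pvLoop (l : List Int) : ∀ (j : Int) (acc : List String),
    (l.foldl
      (fun (s : List String × Int) _ =>
        if s.2 ≥ 2 then (s.1 ++ [PySem.Int.toStr s.2], s.2 - 1)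
        else (s.1 ++ [PySem.Int.toStr 9], (9 : Int) - 1))
      (acc, pvV j)).1
    = acc ++ (PySem.List.enumerate l j).map (fun p => PySem.Int.toStr (pvW p.1)) := by
  induction l with
  | nil => intro j acc; simp [PySem.List.enumerate_nil]
  | cons x t ih =>
    intro j acc
    rw [List.foldl_cons]
    show (List.foldl _ (if pvV j ≥ 2 then (acc ++ [PySem.Int.toStr (pvV j)], pvV j - 1)
      else (acc ++ [PySem.Int.toStr 9], (9 : Int) - 1)) t).1 = _
    rw [pvStep, ih (j + 1), PySem.List.enumerate_cons]
    simp

-- ===== VERDICT (by name: the statement is the Claim_ definition above) =====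
theorem sequencetwo_spec : Claim_equal_sequencetwo := by
  intro cnpj _
  show sequencetwo cnpj = sequencetwo_alt cnpj
  have h6 : pvV 0 = 6 := by
    have := pvW_emod 0
    have h : pvW 0 = 6 := by omega
    simp [pvV, h]
  unfold sequencetwo sequencetwo_alt
  rw [← h6, pvLoop cnpj 0 []]
  simp [pvW]
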